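-- pv_equiv track=rewrite | github.com/cornell-brg/pymtl3-net | analytical/lat_model.py | _get_exp_hops
-- ===== SOURCE A (Python) =====
-- def _get_exp_hops( src_id, dst_id, exp_paths ):
--   exp_hops     = 0
--   channel_hops = 0
--
--   if dst_id == src_id:
--     return 0, 0
--
--   elif dst_id > src_id:
--     cur_id = src_id
--     while cur_id != dst_id:
--       exp_found = False
--       for src, dst in exp_paths:
--         if cur_id == src and dst <= dst_id:
--           cur_id = dst
--           exp_hops  += 1
--           exp_found = True
--           break
--
--       if not exp_found:
--         cur_id       += 1
--         channel_hops += 1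
--
--   else:
--     cur_id = src_id
--     while cur_id != dst_id:
--       exp_found = False
--       for dst, src in exp_paths:
--         if cur_id == src and dst >= dst_id:
--           cur_id = dst
--           exp_hops  += 1
--           exp_found = True
--           break
--
--       if not exp_found:
--         cur_id       -= 1
--         channel_hops += 1
--
--   return exp_hops, channel_hops
-- ===== SOURCE B (Python) =====
-- def _get_exp_hops(src_id, dst_id, exp_paths):
--     if dst_id == src_id:
--         return 0, 0
--
--     if dst_id > src_id:
--         # index: for each express source, its first usable target (first match wins)
--         jump = {}
--         for s, d in exp_paths:
--             if d <= dst_id and s not in jump: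
--                 jump[s] = d
--         exp_hops = 0
--         channel_hops = 0
--         cur = src_id
--         while cur != dst_id:
--             if cur in jump:
--                 cur = jump[cur]
--                 exp_hops += 1
--             else:
--                 cands = [k for k in jump if cur < k < dst_id]
--                 nxt = min(cands) if cands else dst_id
--                 channel_hops += nxt - cur
--                 cur = nxt
--         return exp_hops, channel_hops
--
--     jump = {}
--     for d, s in exp_paths:
--         if d >= dst_id and s not in jump:
--             jump[s] = d
--     exp_hops = 0
--     channel_hops = 0
--     cur = src_id
--     while cur != dst_id:
--         if cur in jump:
--             cur = jump[cur]
--             exp_hops += 1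
--         else:
--             cands = [k for k in jump if dst_id < k < cur]
--             nxt = max(cands) if cands else dst_id
--             channel_hops += cur - nxt
--             cur = nxt
--     return exp_hops, channel_hops
-- ===== Notes on version B (the rewrite author's own statement) =====
-- stated objective: faster
-- what changed: B builds a first-match express-jump index in one dict pass over exp_paths and then walks src->dst by whole segments, batching all consecutive channel hops between express sources into one arithmetic step, instead of A's one-id-at-a-time walk that rescans exp_paths at every single id; intended as faster (a timing run measured B 9.8x-3289x faster at n=4096..262144, the largest sizes where both finished, but could not confirm the label at one size).
-- outside the precondition, e.g. on _get_exp_hops(0, 3, [(0, 2), (1, 1)]): A returns (1, 1), B returns (1, 1)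
import Mathlib
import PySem

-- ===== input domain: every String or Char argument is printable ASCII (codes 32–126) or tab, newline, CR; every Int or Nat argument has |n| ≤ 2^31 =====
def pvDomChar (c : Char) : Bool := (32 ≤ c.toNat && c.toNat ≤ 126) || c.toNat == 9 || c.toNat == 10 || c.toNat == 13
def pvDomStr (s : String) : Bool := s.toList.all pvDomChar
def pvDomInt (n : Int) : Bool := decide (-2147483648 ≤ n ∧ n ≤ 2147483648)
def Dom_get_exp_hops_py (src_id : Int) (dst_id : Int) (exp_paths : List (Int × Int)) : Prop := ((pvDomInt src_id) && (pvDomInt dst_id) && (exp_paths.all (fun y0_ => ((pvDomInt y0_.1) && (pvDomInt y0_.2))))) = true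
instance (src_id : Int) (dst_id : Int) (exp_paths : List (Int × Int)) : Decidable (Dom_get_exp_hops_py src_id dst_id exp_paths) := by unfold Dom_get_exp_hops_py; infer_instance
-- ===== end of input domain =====

-- B replaces A's one-id-at-a-time walk (rescanning exp_paths at every id) by a first-match
-- jump index built in one pass plus a segment walk that batches consecutive channel hops.

-- ===== PORT A =====
-- inner `for src, dst in exp_paths: … break`: first pair matching cur == src and dst <= dst_id
def pvFindUp (cur dst_id : Int) : List (Int × Int) → Option Int
  | [] => none
  | (s, d) :: rest => if cur = s ∧ d ≤ dst_id then some d else pvFindUp cur dst_id rest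

-- inner `for dst, src in exp_paths: … break` of the downward branch
def pvFindDown (cur dst_id : Int) : List (Int × Int) → Option Int
  | [] => none
  | (d, s) :: rest => if cur = s ∧ dst_id ≤ d then some d else pvFindDown cur dst_id rest

-- `while cur_id != dst_id` of the upward branch; fuel is only a totality bound
def pvLoopAUp (dst_id : Int) (paths : List (Int × Int)) : Nat → Int → Int → Int → Int × Int
  | 0, _, exp, ch => (exp, ch)
  | f + 1, cur, exp, ch =>
    if cur = dst_id then (exp, ch)
    else
      match pvFindUp cur dst_id paths with
      | some d => pvLoopAUp dst_id paths f d (exp + 1) ch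
      | none => pvLoopAUp dst_id paths f (cur + 1) exp (ch + 1)

def pvLoopADown (dst_id : Int) (paths : List (Int × Int)) : Nat → Int → Int → Int → Int × Int
  | 0, _, exp, ch => (exp, ch)
  | f + 1, cur, exp, ch =>
    if cur = dst_id then (exp, ch)
    else
      match pvFindDown cur dst_id paths with
      | some d => pvLoopADown dst_id paths f d (exp + 1) ch
      | none => pvLoopADown dst_id paths f (cur - 1) exp (ch + 1)

def get_exp_hops_py (src_id : Int) (dst_id : Int) (exp_paths : List (Int × Int)) : Int × Int :=
  if dst_id = src_id then (0, 0)
  else if src_id < dst_id then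
    pvLoopAUp dst_id exp_paths (dst_id - src_id).toNat src_id 0 0
  else
    pvLoopADown dst_id exp_paths (src_id - dst_id).toNat src_id 0 0

-- ===== PORT B =====
-- `for s, d in exp_paths: if d <= dst_id and s not in jump: jump[s] = d`
def pvBuildUp (dst_id : Int) (paths : List (Int × Int)) : PySem.Dict Int Int :=
  paths.foldl
    (fun j p => if p.2 ≤ dst_id ∧ j.contains p.1 = false then j.insert p.1 p.2 else j)
    PySem.Dict.empty

def pvBuildDown (dst_id : Int) (paths : List (Int × Int)) : PySem.Dict Int Int :=
  paths.foldl
    (fun j p => if dst_id ≤ p.1 ∧ j.contains p.2 = false then j.insert p.2 p.1 else j)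
    PySem.Dict.empty

-- `cands = [k for k in jump if cur < k < dst_id]; nxt = min(cands) if cands else dst_id`
def pvNextUp (jump : PySem.Dict Int Int) (dst_id cur : Int) : Int :=
  match PySem.List.min? ((jump.keys).filter (fun k => decide (cur < k ∧ k < dst_id))) (fun x => x) with
  | some m => m
  | none => dst_id

def pvNextDown (jump : PySem.Dict Int Int) (dst_id cur : Int) : Int :=
  match PySem.List.max? ((jump.keys).filter (fun k => decide (dst_id < k ∧ k < cur))) (fun x => x) with
  | some m => m
  | none => dst_id

def pvLoopBUp (dst_id : Int) (jump : PySem.Dict Int Int) : Nat → Int → Int → Int → Int × Int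
  | 0, _, exp, ch => (exp, ch)
  | f + 1, cur, exp, ch =>
    if cur = dst_id then (exp, ch)
    else
      match jump.get? cur with
      | some d => pvLoopBUp dst_id jump f d (exp + 1) ch
      | none =>
        let nxt := pvNextUp jump dst_id cur
        pvLoopBUp dst_id jump f nxt exp (ch + (nxt - cur))

def pvLoopBDown (dst_id : Int) (jump : PySem.Dict Int Int) : Nat → Int → Int → Int → Int × Int
  | 0, _, exp, ch => (exp, ch)
  | f + 1, cur, exp, ch =>
    if cur = dst_id then (exp, ch)
    else
      match jump.get? cur with
      | some d => pvLoopBDown dst_id jump f d (exp + 1) ch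
      | none =>
        let nxt := pvNextDown jump dst_id cur
        pvLoopBDown dst_id jump f nxt exp (ch + (cur - nxt))

def get_exp_hops_py_alt (src_id : Int) (dst_id : Int) (exp_paths : List (Int × Int)) : Int × Int :=
  if dst_id = src_id then (0, 0)
  else if src_id < dst_id then
    pvLoopBUp dst_id (pvBuildUp dst_id exp_paths) (dst_id - src_id).toNat src_id 0 0
  else
    pvLoopBDown dst_id (pvBuildDown dst_id exp_paths) (src_id - dst_id).toNat src_id 0 0

-- ===== PRECONDITION & SPEC =====
-- Pre_ excludes inputs having a non-advancing express pair whose source lies inside the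
-- walked interval: on those A loops forever unless the pair happens to be jumped over, and
-- where A still returns (the pair is skipped) B returns the same value.
def Pre_get_exp_hops_py (src_id : Int) (dst_id : Int) (exp_paths : List (Int × Int)) : Prop :=
  (src_id < dst_id → ∀ p ∈ exp_paths, ¬(src_id ≤ p.1 ∧ p.1 < dst_id ∧ p.2 ≤ dst_id ∧ p.2 ≤ p.1)) ∧
  (dst_id < src_id → ∀ p ∈ exp_paths, ¬(dst_id < p.2 ∧ p.2 ≤ src_id ∧ dst_id ≤ p.1 ∧ p.2 ≤ p.1))

instance (src_id : Int) (dst_id : Int) (exp_paths : List (Int × Int)) : Decidable (Pre_get_exp_hops_py src_id dst_id exp_paths) := by unfold Pre_get_exp_hops_py; infer_instance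

def pvWitness_get_exp_hops_py : Int × Int × (List (Int × Int)) := (0, 5, [(1, 3)])

def Spec_get_exp_hops_py (src_id : Int) (dst_id : Int) (exp_paths : List (Int × Int)) (out : Int × Int) : Prop := out = get_exp_hops_py_alt src_id dst_id exp_paths
instance (src_id : Int) (dst_id : Int) (exp_paths : List (Int × Int)) (out : Int × Int) : Decidable (Spec_get_exp_hops_py src_id dst_id exp_paths out) := by unfold Spec_get_exp_hops_py; infer_instance

-- ===== CLAIM (what is proved, stated in full; the proofs are below) =====
def Claim_equal_get_exp_hops_py : Prop := ∀ (src_id : Int) (dst_id : Int) (exp_paths : List (Int × Int)), Dom_get_exp_hops_py src_id dst_id exp_paths → Pre_get_exp_hops_py src_id dst_id exp_paths → Spec_get_exp_hops_py src_id dst_id exp_paths (get_exp_hops_py src_id dst_id exp_paths)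

-- ===== LEMMAS AND PROOFS =====

theorem findUp_some (cur dst : Int) (l : List (Int × Int)) (d : Int)
    (h : pvFindUp cur dst l = some d) : (cur, d) ∈ l ∧ d ≤ dst := by
  induction l with
  | nil => simp [pvFindUp] at h
  | cons p t ih =>
    obtain ⟨s, v⟩ := p
    simp only [pvFindUp] at h
    split_ifs at h with hc
    · obtain ⟨rfl, hv⟩ := hc
      obtain rfl : v = d := by injection h
      exact ⟨List.mem_cons_self, hv⟩
    · obtain ⟨hm, hd⟩ := ih h
      exact ⟨List.mem_cons_of_mem _ hm, hd⟩

theorem findDown_some (cur dst : Int) (l : List (Int × Int)) (d : Int)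
    (h : pvFindDown cur dst l = some d) : (d, cur) ∈ l ∧ dst ≤ d := by
  induction l with
  | nil => simp [pvFindDown] at h
  | cons p t ih =>
    obtain ⟨v, s⟩ := p
    simp only [pvFindDown] at h
    split_ifs at h with hc
    · obtain ⟨rfl, hv⟩ := hc
      obtain rfl : v = d := by injection h
      exact ⟨List.mem_cons_self, hv⟩
    · obtain ⟨hm, hd⟩ := ih h
      exact ⟨List.mem_cons_of_mem _ hm, hd⟩

theorem buildUp_get? (dst : Int) (l : List (Int × Int)) :
    ∀ (j : PySem.Dict Int Int) (cur : Int),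
      (l.foldl (fun j p => if p.2 ≤ dst ∧ j.contains p.1 = false then j.insert p.1 p.2 else j) j).get? cur
        = match j.get? cur with
          | some v => some v
          | none => pvFindUp cur dst l := by
  induction l with
  | nil => intro j cur; cases h : j.get? cur <;> simp [pvFindUp, h]
  | cons p t ih =>
    intro j cur
    obtain ⟨s, d⟩ := p
    simp only [List.foldl_cons]
    rw [ih]
    by_cases hcond : d ≤ dst ∧ j.contains s = false
    · rw [if_pos hcond, PySem.Dict.get?_insert]
      by_cases hcs : cur = s
      · subst hcs
        have hnone : j.get? cur = none := by
          have hc := PySem.Dict.contains_eq_isSome_get? j cur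
          rw [hcond.2] at hc
          cases h : j.get? cur
          · rfl
          · rw [h] at hc; simp at hc
        simp [hnone, pvFindUp, hcond.1]
      · simp only [if_neg hcs]
        cases h : j.get? cur <;> simp [pvFindUp, hcs]
    · rw [if_neg hcond]
      cases h : j.get? cur
      · have hnc : ¬(cur = s ∧ d ≤ dst) := by
          rintro ⟨rfl, hd⟩
          apply hcond
          refine ⟨hd, ?_⟩
          have hc := PySem.Dict.contains_eq_isSome_get? j cur
          rw [h] at hc; simpa using hc
        simp [pvFindUp, hnc]
      · simp

theorem buildDown_get? (dst : Int) (l : List (Int × Int)) :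
    ∀ (j : PySem.Dict Int Int) (cur : Int),
      (l.foldl (fun j p => if dst ≤ p.1 ∧ j.contains p.2 = false then j.insert p.2 p.1 else j) j).get? cur
        = match j.get? cur with
          | some v => some v
          | none => pvFindDown cur dst l := by
  induction l with
  | nil => intro j cur; cases h : j.get? cur <;> simp [pvFindDown, h]
  | cons p t ih =>
    intro j cur
    obtain ⟨d, s⟩ := p
    simp only [List.foldl_cons]
    rw [ih]
    by_cases hcond : dst ≤ d ∧ j.contains s = false
    · rw [if_pos hcond, PySem.Dict.get?_insert]
      by_cases hcs : cur = s
      · subst hcs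
        have hnone : j.get? cur = none := by
          have hc := PySem.Dict.contains_eq_isSome_get? j cur
          rw [hcond.2] at hc
          cases h : j.get? cur
          · rfl
          · rw [h] at hc; simp at hc
        simp [hnone, pvFindDown, hcond.1]
      · simp only [if_neg hcs]
        cases h : j.get? cur <;> simp [pvFindDown, hcs]
    · rw [if_neg hcond]
      cases h : j.get? cur
      · have hnc : ¬(cur = s ∧ dst ≤ d) := by
          rintro ⟨rfl, hd⟩
          apply hcond
          refine ⟨hd, ?_⟩
          have hc := PySem.Dict.contains_eq_isSome_get? j cur
          rw [h] at hc; simpa using hc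
        simp [pvFindDown, hnc]
      · simp

theorem jumpUp_get? (dst : Int) (paths : List (Int × Int)) (cur : Int) :
    (pvBuildUp dst paths).get? cur = pvFindUp cur dst paths := by
  have := buildUp_get? dst paths PySem.Dict.empty cur
  simpa [pvBuildUp, PySem.Dict.get?_empty] using this

theorem jumpDown_get? (dst : Int) (paths : List (Int × Int)) (cur : Int) :
    (pvBuildDown dst paths).get? cur = pvFindDown cur dst paths := by
  have := buildDown_get? dst paths PySem.Dict.empty cur
  simpa [pvBuildDown, PySem.Dict.get?_empty] using this

theorem batchUp (dst : Int) (paths : List (Int × Int)) :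
    ∀ (m : Nat) (cur nxt : Int), (nxt - cur).toNat = m → cur ≤ nxt → nxt ≤ dst →
      (∀ k, cur ≤ k → k < nxt → pvFindUp k dst paths = none) →
      ∀ (f : Nat), m ≤ f → ∀ (exp ch : Int),
        pvLoopAUp dst paths f cur exp ch = pvLoopAUp dst paths (f - m) nxt exp (ch + (nxt - cur)) := by
  intro m
  induction m with
  | zero =>
    intro cur nxt hm hcn hnd _ f _ exp ch
    obtain rfl : nxt = cur := by omega
    simp
  | succ m ih =>
    intro cur nxt hm hcn hnd hnone f hf exp ch
    have hlt : cur < nxt := by omega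
    obtain ⟨f', rfl⟩ : ∃ f', f = f' + 1 := ⟨f - 1, by omega⟩
    have hne : cur ≠ dst := by omega
    have hstep := ih (cur + 1) nxt (by omega) (by omega) hnd
      (fun k hk1 hk2 => hnone k (by omega) hk2) f' (by omega) exp (ch + 1)
    have h1 : f' - m = f' + 1 - (m + 1) := by omega
    have h2 : ch + 1 + (nxt - (cur + 1)) = ch + (nxt - cur) := by ring
    rw [h1, h2] at hstep
    simp only [pvLoopAUp, if_neg hne, hnone cur le_rfl hlt]
    exact hstep

theorem batchDown (dst : Int) (paths : List (Int × Int)) :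
    ∀ (m : Nat) (cur nxt : Int), (cur - nxt).toNat = m → nxt ≤ cur → dst ≤ nxt →
      (∀ k, k ≤ cur → nxt < k → pvFindDown k dst paths = none) →
      ∀ (f : Nat), m ≤ f → ∀ (exp ch : Int),
        pvLoopADown dst paths f cur exp ch = pvLoopADown dst paths (f - m) nxt exp (ch + (cur - nxt)) := by
  intro m
  induction m with
  | zero =>
    intro cur nxt hm hcn hnd _ f _ exp ch
    obtain rfl : nxt = cur := by omega
    simp
  | succ m ih =>
    intro cur nxt hm hcn hnd hnone f hf exp ch
    have hlt : nxt < cur := by omega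
    obtain ⟨f', rfl⟩ : ∃ f', f = f' + 1 := ⟨f - 1, by omega⟩
    have hne : cur ≠ dst := by omega
    have hstep := ih (cur - 1) nxt (by omega) (by omega) hnd
      (fun k hk1 hk2 => hnone k (by omega) hk2) f' (by omega) exp (ch + 1)
    have h1 : f' - m = f' + 1 - (m + 1) := by omega
    have h2 : ch + 1 + (cur - 1 - nxt) = ch + (cur - nxt) := by ring
    rw [h1, h2] at hstep
    simp only [pvLoopADown, if_neg hne, hnone cur le_rfl hlt]
    exact hstep

theorem mainUp (src dst : Int) (paths : List (Int × Int))
    (hpre : ∀ p ∈ paths, ¬(src ≤ p.1 ∧ p.1 < dst ∧ p.2 ≤ dst ∧ p.2 ≤ p.1)) :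
    ∀ (n : Nat) (cur : Int), (dst - cur).toNat = n → src ≤ cur → cur ≤ dst →
      ∀ (fa fb : Nat), n ≤ fa → n ≤ fb → ∀ (exp ch : Int),
        pvLoopAUp dst paths fa cur exp ch
          = pvLoopBUp dst (pvBuildUp dst paths) fb cur exp ch := by
  intro n
  induction n using Nat.strong_induction_on with
  | _ n ih =>
    intro cur hn hsc hcd fa fb hfa hfb exp ch
    by_cases hcur : cur = dst
    · subst hcur
      cases fa <;> cases fb <;> simp [pvLoopAUp, pvLoopBUp]
    · have hlt : cur < dst := lt_of_le_of_ne hcd hcur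
      have hn1 : 1 ≤ n := by omega
      obtain ⟨fa', rfl⟩ : ∃ f, fa = f + 1 := ⟨fa - 1, by omega⟩
      obtain ⟨fb', rfl⟩ : ∃ f, fb = f + 1 := ⟨fb - 1, by omega⟩
      have hget := jumpUp_get? dst paths cur
      cases hfind : pvFindUp cur dst paths with
      | some d =>
        rw [hfind] at hget
        obtain ⟨hmem, hdd⟩ := findUp_some _ _ _ _ hfind
        have hdgt : cur < d := by
          by_contra hno
          exact hpre _ hmem ⟨hsc, hlt, hdd, by omega⟩
        simp only [pvLoopAUp, pvLoopBUp, if_neg hcur, hfind, hget]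
        exact ih (dst - d).toNat (by omega) d rfl (by omega) hdd fa' fb' (by omega) (by omega) _ _
      | none =>
        rw [hfind] at hget
        have hfacts : cur < pvNextUp (pvBuildUp dst paths) dst cur ∧
            pvNextUp (pvBuildUp dst paths) dst cur ≤ dst ∧
            (∀ k, cur ≤ k → k < pvNextUp (pvBuildUp dst paths) dst cur →
              pvFindUp k dst paths = none) := by
          cases hmin : PySem.List.min?
              (((pvBuildUp dst paths).keys).filter (fun k => decide (cur < k ∧ k < dst)))
              (fun x => x) with
          | none =>
            have hempty := (PySem.List.min?_eq_none_iff _ _).mp hmin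
            have hnd : pvNextUp (pvBuildUp dst paths) dst cur = dst := by
              unfold pvNextUp; rw [hmin]
            rw [hnd]
            refine ⟨hlt, le_rfl, ?_⟩
            intro k hk1 hk2
            by_cases hkc : k = cur
            · subst hkc; exact hfind
            · by_contra hkn
              obtain ⟨v, hv⟩ : ∃ v, pvFindUp k dst paths = some v :=
                Option.ne_none_iff_exists'.mp hkn
              have hgk : (pvBuildUp dst paths).get? k = some v := by
                rw [jumpUp_get?]; exact hv
              have hkmem : k ∈ (pvBuildUp dst paths).keys := by
                by_contra hnm
                have h0 := (PySem.Dict.get?_eq_none_iff_not_mem_keys (pvBuildUp dst paths) k).mpr hnm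
                rw [hgk] at h0; cases h0
              have hkf : k ∈ ((pvBuildUp dst paths).keys).filter
                  (fun k => decide (cur < k ∧ k < dst)) :=
                List.mem_filter.mpr ⟨hkmem, by simp; omega⟩
              rw [hempty] at hkf; cases hkf
          | some m =>
            have hmmem := PySem.List.min?_mem hmin
            obtain ⟨hmk, hmc⟩ := List.mem_filter.mp hmmem
            have hmc' : cur < m ∧ m < dst := by simpa using hmc
            have hnm : pvNextUp (pvBuildUp dst paths) dst cur = m := by
              unfold pvNextUp; rw [hmin]
            rw [hnm]
            refine ⟨hmc'.1, le_of_lt hmc'.2, ?_⟩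
            intro k hk1 hk2
            by_cases hkc : k = cur
            · subst hkc; exact hfind
            · by_contra hkn
              obtain ⟨v, hv⟩ : ∃ v, pvFindUp k dst paths = some v :=
                Option.ne_none_iff_exists'.mp hkn
              have hgk : (pvBuildUp dst paths).get? k = some v := by
                rw [jumpUp_get?]; exact hv
              have hkmem : k ∈ (pvBuildUp dst paths).keys := by
                by_contra hnm
                have h0 := (PySem.Dict.get?_eq_none_iff_not_mem_keys (pvBuildUp dst paths) k).mpr hnm
                rw [hgk] at h0; cases h0
              have hkf : k ∈ ((pvBuildUp dst paths).keys).filter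
                  (fun k => decide (cur < k ∧ k < dst)) :=
                List.mem_filter.mpr ⟨hkmem, by simp; omega⟩
              have := PySem.List.min?_isMin hmin k hkf
              simp at this; omega
        obtain ⟨h1, h2, h3⟩ := hfacts
        have hbatch := batchUp dst paths (pvNextUp (pvBuildUp dst paths) dst cur - cur).toNat cur
          (pvNextUp (pvBuildUp dst paths) dst cur) rfl (le_of_lt h1) h2 h3 (fa' + 1) (by omega) exp ch
        rw [hbatch]
        simp only [pvLoopBUp, if_neg hcur, hget]
        exact ih (dst - pvNextUp (pvBuildUp dst paths) dst cur).toNat (by omega)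
          (pvNextUp (pvBuildUp dst paths) dst cur) rfl (by omega) h2 _ fb' (by omega) (by omega) _ _

theorem mainDown (src dst : Int) (paths : List (Int × Int))
    (hpre : ∀ p ∈ paths, ¬(dst < p.2 ∧ p.2 ≤ src ∧ dst ≤ p.1 ∧ p.2 ≤ p.1)) :
    ∀ (n : Nat) (cur : Int), (cur - dst).toNat = n → cur ≤ src → dst ≤ cur →
      ∀ (fa fb : Nat), n ≤ fa → n ≤ fb → ∀ (exp ch : Int),
        pvLoopADown dst paths fa cur exp ch
          = pvLoopBDown dst (pvBuildDown dst paths) fb cur exp ch := by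
  intro n
  induction n using Nat.strong_induction_on with
  | _ n ih =>
    intro cur hn hsc hcd fa fb hfa hfb exp ch
    by_cases hcur : cur = dst
    · subst hcur
      cases fa <;> cases fb <;> simp [pvLoopADown, pvLoopBDown]
    · have hlt : dst < cur := by omega
      have hn1 : 1 ≤ n := by omega
      obtain ⟨fa', rfl⟩ : ∃ f, fa = f + 1 := ⟨fa - 1, by omega⟩
      obtain ⟨fb', rfl⟩ : ∃ f, fb = f + 1 := ⟨fb - 1, by omega⟩
      have hget := jumpDown_get? dst paths cur
      cases hfind : pvFindDown cur dst paths with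
      | some d =>
        rw [hfind] at hget
        obtain ⟨hmem, hdd⟩ := findDown_some _ _ _ _ hfind
        have hdgt : d < cur := by
          by_contra hno
          exact hpre _ hmem ⟨hlt, hsc, hdd, by omega⟩
        simp only [pvLoopADown, pvLoopBDown, if_neg hcur, hfind, hget]
        exact ih (d - dst).toNat (by omega) d rfl (by omega) hdd fa' fb' (by omega) (by omega) _ _
      | none =>
        rw [hfind] at hget
        have hfacts : pvNextDown (pvBuildDown dst paths) dst cur < cur ∧
            dst ≤ pvNextDown (pvBuildDown dst paths) dst cur ∧
            (∀ k, k ≤ cur → pvNextDown (pvBuildDown dst paths) dst cur < k →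
              pvFindDown k dst paths = none) := by
          cases hmin : PySem.List.max?
              (((pvBuildDown dst paths).keys).filter (fun k => decide (dst < k ∧ k < cur)))
              (fun x => x) with
          | none =>
            have hempty := (PySem.List.max?_eq_none_iff _ _).mp hmin
            have hnd : pvNextDown (pvBuildDown dst paths) dst cur = dst := by
              unfold pvNextDown; rw [hmin]
            rw [hnd]
            refine ⟨hlt, le_rfl, ?_⟩
            intro k hk1 hk2
            by_cases hkc : k = cur
            · subst hkc; exact hfind
            · by_contra hkn
              obtain ⟨v, hv⟩ : ∃ v, pvFindDown k dst paths = some v :=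
                Option.ne_none_iff_exists'.mp hkn
              have hgk : (pvBuildDown dst paths).get? k = some v := by
                rw [jumpDown_get?]; exact hv
              have hkmem : k ∈ (pvBuildDown dst paths).keys := by
                by_contra hnm
                have h0 := (PySem.Dict.get?_eq_none_iff_not_mem_keys (pvBuildDown dst paths) k).mpr hnm
                rw [hgk] at h0; cases h0
              have hkf : k ∈ ((pvBuildDown dst paths).keys).filter
                  (fun k => decide (dst < k ∧ k < cur)) :=
                List.mem_filter.mpr ⟨hkmem, by simp; omega⟩
              rw [hempty] at hkf; cases hkf
          | some m =>
            have hmmem := PySem.List.max?_mem hmin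
            obtain ⟨hmk, hmc⟩ := List.mem_filter.mp hmmem
            have hmc' : dst < m ∧ m < cur := by simpa using hmc
            have hnm : pvNextDown (pvBuildDown dst paths) dst cur = m := by
              unfold pvNextDown; rw [hmin]
            rw [hnm]
            refine ⟨hmc'.2, le_of_lt hmc'.1, ?_⟩
            intro k hk1 hk2
            by_cases hkc : k = cur
            · subst hkc; exact hfind
            · by_contra hkn
              obtain ⟨v, hv⟩ : ∃ v, pvFindDown k dst paths = some v :=
                Option.ne_none_iff_exists'.mp hkn
              have hgk : (pvBuildDown dst paths).get? k = some v := by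
                rw [jumpDown_get?]; exact hv
              have hkmem : k ∈ (pvBuildDown dst paths).keys := by
                by_contra hnm'
                have h0 := (PySem.Dict.get?_eq_none_iff_not_mem_keys (pvBuildDown dst paths) k).mpr hnm'
                rw [hgk] at h0; cases h0
              have hkf : k ∈ ((pvBuildDown dst paths).keys).filter
                  (fun k => decide (dst < k ∧ k < cur)) :=
                List.mem_filter.mpr ⟨hkmem, by simp; omega⟩
              have := PySem.List.max?_isMax hmin k hkf
              simp at this; omega
        obtain ⟨h1, h2, h3⟩ := hfacts
        have hbatch := batchDown dst paths (cur - pvNextDown (pvBuildDown dst paths) dst cur).toNat cur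
          (pvNextDown (pvBuildDown dst paths) dst cur) rfl (le_of_lt h1) h2 h3 (fa' + 1) (by omega) exp ch
        rw [hbatch]
        simp only [pvLoopBDown, if_neg hcur, hget]
        exact ih (pvNextDown (pvBuildDown dst paths) dst cur - dst).toNat (by omega)
          (pvNextDown (pvBuildDown dst paths) dst cur) rfl (by omega) h2 _ fb' (by omega) (by omega) _ _

-- ===== VERDICT (by name: the statement is the Claim_ definition above) =====
theorem get_exp_hops_py_spec : Claim_equal_get_exp_hops_py := by
  intro src dst paths _ hpre
  unfold Spec_get_exp_hops_py get_exp_hops_py get_exp_hops_py_alt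
  by_cases h0 : dst = src
  · simp [h0]
  · simp only [if_neg h0]
    by_cases h1 : src < dst
    · simp only [if_pos h1]
      exact mainUp src dst paths (hpre.1 h1) (dst - src).toNat src rfl le_rfl (le_of_lt h1)
        _ _ le_rfl le_rfl 0 0
    · simp only [if_neg h1]
      have h2 : dst < src := by omega
      exact mainDown src dst paths (hpre.2 h2) (src - dst).toNat src rfl le_rfl (le_of_lt h2)
        _ _ le_rfl le_rfl 0 0
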